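-- pv_equiv track=rewrite | github.com/Keeper-Security/Commander | keepercommander/importer/importer.py | import_phone_field
-- ===== SOURCE A (Python) =====
-- def import_phone_field(value):   # type: (str) -> Optional[dict]
--     if isinstance(value, str):
--         region = ''
--         number = ''
--         ext = ''
--         phone_type, _, rest = value.partition(':')
--         if not rest:
--             rest = phone_type
--             phone_type = ''
--         comps = rest.strip().split(' ')
--         for comp in comps:
--             comp = comp.strip()
--             if comp.isalpha():
--                 if len(comp) == 2:
--                     if not region:
--                         region = comp
--                 elif not phone_type:
--                     phone_type = comp
--             elif len(comp) >= 6: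
--                 if not number:
--                     number = comp
--             elif not ext:
--                 ext = comp
--         result = {
--             'type': '',
--             'region': '',
--             'number': number.strip(),
--             'ext': ext.strip()
--         }
--         phone_type = phone_type.strip()
--         region = region.strip()
--         if phone_type:
--             result['type'] = phone_type
--         if region:
--             result['region'] = region
--         return result
-- ===== SOURCE B (Python) =====
-- def import_phone_field(value):
--     if not isinstance(value, str):
--         return None
--     head, _, tail = value.partition(':')
--     phone_type, rest = (head, tail) if tail else ('', head)
--     comps = [c.strip() for c in rest.strip().split(' ')]
--     if not phone_type:
--         phone_type = next((c for c in comps if c.isalpha() and len(c) != 2), '')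
--     return {
--         'type': phone_type.strip(),
--         'region': next((c for c in comps if c.isalpha() and len(c) == 2), ''),
--         'number': next((c for c in comps if not c.isalpha() and len(c) >= 6), ''),
--         'ext': next((c for c in comps if c and not c.isalpha() and len(c) < 6), ''),
--     }
-- ===== Notes on version B (the rewrite author's own statement) =====
-- stated objective: simpler
-- what changed: Replaces A's single stateful loop carrying four first-match accumulators (plus the post-hoc dict patching of 'type'/'region') by one independent first-match search per field and direct construction of the result dict.
import Mathlib
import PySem

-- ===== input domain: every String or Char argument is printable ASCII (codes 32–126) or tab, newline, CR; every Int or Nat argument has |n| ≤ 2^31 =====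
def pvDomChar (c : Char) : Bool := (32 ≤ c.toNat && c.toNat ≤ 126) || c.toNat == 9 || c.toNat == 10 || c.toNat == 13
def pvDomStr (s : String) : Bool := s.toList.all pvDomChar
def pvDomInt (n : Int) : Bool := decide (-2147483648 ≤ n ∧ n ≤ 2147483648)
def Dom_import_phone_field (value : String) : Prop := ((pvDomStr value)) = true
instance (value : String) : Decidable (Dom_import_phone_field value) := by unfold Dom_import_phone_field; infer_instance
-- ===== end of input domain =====

-- B replaces A's four-way stateful loop by one find-per-field pass and builds the
-- result dict directly instead of patching a prefilled dict (objective: simpler).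

-- value.partition(':') restricted to its used projections: (before first ':', after first ':');
-- the second component is [] when there is no ':' — exactly Python's '' there (hand port, exact).
def pvPartitionColon : List Char → List Char × List Char
  | [] => ([], [])
  | c :: cs =>
    if c = ':' then ([], cs)
    else
      let p := pvPartitionColon cs
      (c :: p.1, p.2)

-- ===== PORT A =====
-- one iteration of A's for-loop over (phone_type, region, number, ext)
def pvStep (st : List Char × List Char × List Char × List Char) (comp0 : List Char) :
    List Char × List Char × List Char × List Char :=
  let comp := PySem.Chars.strip comp0
  match st with
  | (t, r, n, e) =>
    if PySem.Chars.strIsalpha comp then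
      if comp.length == 2 then
        if r.isEmpty then (t, comp, n, e) else (t, r, n, e)
      else if t.isEmpty then (comp, r, n, e) else (t, r, n, e)
    else if 6 ≤ comp.length then
      if n.isEmpty then (t, r, comp, e) else (t, r, n, e)
    else if e.isEmpty then (t, r, n, comp) else (t, r, n, e)

-- Python dict assignment result[k] = v on an existing key: overwrite in place
def pvSetKey : List (String × String) → String → String → List (String × String)
  | [], k, v => [(k, v)]
  | (k', v') :: rest, k, v =>
    if k' == k then (k, v) :: rest else (k', v') :: pvSetKey rest k v

def import_phone_field (value : String) : Option (List (String × String)) :=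
  let p := pvPartitionColon value.toList
  let pr := if p.2.isEmpty then (([] : List Char), p.1) else (p.1, p.2)
  let comps := PySem.Chars.splitOn (PySem.Chars.strip pr.2) [' ']
  match comps.foldl pvStep (pr.1, [], [], []) with
  | (t, r, n, e) =>
    let base : List (String × String) :=
      [("type", ""), ("region", ""),
       ("number", String.ofList (PySem.Chars.strip n)),
       ("ext", String.ofList (PySem.Chars.strip e))]
    let t' := PySem.Chars.strip t
    let r' := PySem.Chars.strip r
    let d1 := if !t'.isEmpty then pvSetKey base "type" (String.ofList t') else base
    let d2 := if !r'.isEmpty then pvSetKey d1 "region" (String.ofList r') else d1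
    some d2

-- ===== PORT B =====
def import_phone_field_alt (value : String) : Option (List (String × String)) :=
  let p := pvPartitionColon value.toList
  let pr := if p.2.isEmpty then (([] : List Char), p.1) else (p.1, p.2)
  let comps := (PySem.Chars.splitOn (PySem.Chars.strip pr.2) [' ']).map PySem.Chars.strip
  let ptype :=
    if pr.1.isEmpty then
      (comps.find? (fun c => PySem.Chars.strIsalpha c && !(c.length == 2))).getD []
    else pr.1
  some [("type", String.ofList (PySem.Chars.strip ptype)),
        ("region", String.ofList ((comps.find? (fun c => PySem.Chars.strIsalpha c && c.length == 2)).getD [])),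
        ("number", String.ofList ((comps.find? (fun c => !PySem.Chars.strIsalpha c && 6 ≤ c.length)).getD [])),
        ("ext", String.ofList ((comps.find? (fun c => !c.isEmpty && !PySem.Chars.strIsalpha c && c.length < 6)).getD []))]

-- ===== PRECONDITION & SPEC =====
def Spec_import_phone_field (value : String) (out : Option (List (String × String))) : Prop := out = import_phone_field_alt value
instance (value : String) (out : Option (List (String × String))) : Decidable (Spec_import_phone_field value out) := by unfold Spec_import_phone_field; infer_instance

-- ===== CLAIM (what is proved, stated in full; the proofs are below) =====
def Claim_equal_import_phone_field : Prop := ∀ (value : String), Dom_import_phone_field value → Spec_import_phone_field value (import_phone_field value)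

-- ===== LEMMAS AND PROOFS =====

theorem pv_dw_prefix (p : Char → Bool) (l m : List Char) (h : m <+: l) (hl : l.dropWhile p = l) :
    m.dropWhile p = m := by
  cases m with
  | nil => simp
  | cons a t =>
    obtain ⟨s, rfl⟩ := h
    rw [List.cons_append] at hl
    rw [List.dropWhile_cons] at hl ⊢
    by_cases hp : p a = true
    · simp [hp] at hl
      have := congrArg List.length hl
      have h2 := List.length_dropWhile_le p (t ++ s)
      simp at this h2; omega
    · simp [hp]

theorem pv_strip_idem (s : List Char) :
    PySem.Chars.strip (PySem.Chars.strip s) = PySem.Chars.strip s := by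
  show PySem.Chars.rstrip (PySem.Chars.lstrip (PySem.Chars.rstrip (PySem.Chars.lstrip s))) = _
  set u := PySem.Chars.lstrip s with hu
  have hlu : u.dropWhile PySem.Chars.isspace = u := List.dropWhile_idempotent _ s
  have hpre : PySem.Chars.rstrip u <+: u := by
    unfold PySem.Chars.rstrip
    have := List.dropWhile_suffix (l := u.reverse) (p := PySem.Chars.isspace)
    have h2 := List.reverse_prefix.mpr
      (by simpa using this : List.dropWhile PySem.Chars.isspace u.reverse <:+ u.reverse)
    simpa using h2
  have h1 : PySem.Chars.lstrip (PySem.Chars.rstrip u) = PySem.Chars.rstrip u :=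
    pv_dw_prefix _ _ _ hpre hlu
  rw [h1]
  show (List.dropWhile _ (List.dropWhile _ u.reverse).reverse.reverse).reverse = _
  rw [List.reverse_reverse, List.dropWhile_idempotent]
  rfl

-- the value a field has after A's loop, expressed by B's one-field search
def pvSel (x : List Char) (p : List Char → Bool) (l : List (List Char)) : List Char :=
  if x.isEmpty then ((l.map PySem.Chars.strip).find? p).getD [] else x

theorem pv_alpha_ne_nil (c : List Char) (h : PySem.Chars.strIsalpha c = true) : c.isEmpty = false := by
  unfold PySem.Chars.strIsalpha at h
  simp at h ⊢
  exact h.1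

theorem pv_loop_eq (l : List (List Char)) (t r n e : List Char) :
    l.foldl pvStep (t, r, n, e) =
      (pvSel t (fun c => PySem.Chars.strIsalpha c && !(c.length == 2)) l,
       pvSel r (fun c => PySem.Chars.strIsalpha c && c.length == 2) l,
       pvSel n (fun c => !PySem.Chars.strIsalpha c && 6 ≤ c.length) l,
       pvSel e (fun c => !c.isEmpty && !PySem.Chars.strIsalpha c && c.length < 6) l) := by
  induction l generalizing t r n e with
  | nil => simp [pvSel]
  | cons c0 l ih =>
    rw [List.foldl_cons]
    set c := PySem.Chars.strip c0 with hc
    by_cases ha : PySem.Chars.strIsalpha c = true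
    · have hne := pv_alpha_ne_nil c ha
      by_cases h2 : c.length = 2
      · by_cases hr : r = []
        · rw [show pvStep (t, r, n, e) c0 = (t, c, n, e) by
            simp [pvStep, ← hc, ha, h2, hr], ih]
          simp [pvSel, ← hc, ha, h2, hr, hne]
        · rw [show pvStep (t, r, n, e) c0 = (t, r, n, e) by
            simp [pvStep, ← hc, ha, h2, hr], ih]
          simp [pvSel, ← hc, ha, h2, hr, hne]
      · by_cases ht : t = []
        · rw [show pvStep (t, r, n, e) c0 = (c, r, n, e) by
            simp [pvStep, ← hc, ha, h2, ht], ih]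
          simp [pvSel, ← hc, ha, h2, ht, hne]
        · rw [show pvStep (t, r, n, e) c0 = (t, r, n, e) by
            simp [pvStep, ← hc, ha, h2, ht], ih]
          simp [pvSel, ← hc, ha, h2, ht, hne]
    · by_cases h6 : 6 ≤ c.length
      · by_cases hn : n = []
        · rw [show pvStep (t, r, n, e) c0 = (t, r, c, e) by
            simp [pvStep, ← hc, ha, h6, hn], ih]
          simp [pvSel, ← hc, ha, h6, hn]
          intro h'
          rw [h'] at h6
          simp at h6
        · rw [show pvStep (t, r, n, e) c0 = (t, r, n, e) by
            simp [pvStep, ← hc, ha, h6, hn], ih]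
          simp [pvSel, ← hc, ha, h6, hn]
      · by_cases he : e = []
        · rw [show pvStep (t, r, n, e) c0 = (t, r, n, c) by
            simp [pvStep, ← hc, ha, h6, he], ih]
          by_cases hce : c.isEmpty
          · have : c = [] := by simpa [List.isEmpty_iff] using hce
            simp [pvSel, ← hc, he, this,
              show PySem.Chars.strIsalpha [] = false from rfl]
          · have hlt : c.length < 6 := by omega
            simp [pvSel, ← hc, ha, h6, he, hce, hlt]
        · rw [show pvStep (t, r, n, e) c0 = (t, r, n, e) by
            simp [pvStep, ← hc, ha, h6, he], ih]
          simp [pvSel, ← hc, ha, h6, he]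

theorem pv_mem_strip (x : List Char) (l : List (List Char)) (h : x ∈ l.map PySem.Chars.strip) :
    PySem.Chars.strip x = x := by
  simp at h
  obtain ⟨y, _, rfl⟩ := h
  exact pv_strip_idem y

theorem pv_strip_find (p : List Char → Bool) (l : List (List Char)) :
    PySem.Chars.strip (((l.map PySem.Chars.strip).find? p).getD []) =
      ((l.map PySem.Chars.strip).find? p).getD [] := by
  cases hf : (l.map PySem.Chars.strip).find? p with
  | none => rfl
  | some x =>
    simp
    exact pv_mem_strip x l (List.mem_of_find?_eq_some hf)

-- ===== VERDICT (by name: the statement is the Claim_ definition above) =====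
theorem import_phone_field_spec : Claim_equal_import_phone_field := by
  intro value _
  show import_phone_field value = import_phone_field_alt value
  unfold import_phone_field import_phone_field_alt
  simp only [pv_loop_eq]
  set p := pvPartitionColon value.toList
  set pr := if p.2.isEmpty then (([] : List Char), p.1) else (p.1, p.2) with hpr
  set l := PySem.Chars.splitOn (PySem.Chars.strip pr.2) [' '] with hl
  simp only [pvSel, List.isEmpty_nil, if_true]
  set T := if pr.1.isEmpty then ((l.map PySem.Chars.strip).find?
      (fun c => PySem.Chars.strIsalpha c && !(c.length == 2))).getD [] else pr.1 with hT
  set R := ((l.map PySem.Chars.strip).find?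
      (fun c => PySem.Chars.strIsalpha c && c.length == 2)).getD [] with hR
  have hRs : PySem.Chars.strip R = R := pv_strip_find _ l
  rw [hRs]
  simp only [pv_strip_find]
  by_cases hts : (PySem.Chars.strip T).isEmpty
  · have h0 : PySem.Chars.strip T = [] := by simpa [List.isEmpty_iff] using hts
    by_cases hrs : R.isEmpty
    · have h1 : R = [] := by simpa [List.isEmpty_iff] using hrs
      simp [h0, h1]
    · simp [hrs, h0, pvSetKey]
  · by_cases hrs : R.isEmpty
    · have h1 : R = [] := by simpa [List.isEmpty_iff] using hrs
      simp [hts, h1, pvSetKey]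
    · simp [hts, hrs, pvSetKey]
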